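-- pv_equiv track=rewrite | github.com/Arsen1302/Code-copy-detector | TestData/solutions/problem_1097_5.py | solution_1097_5
-- ===== SOURCE A (Python) =====
-- def solution_1097_5(s: str) -> int:
--
-- 	seen = {}
-- 	maxLen = -1
--
-- 	for idx, char in enumerate(s):
-- 		if char in seen:
-- 			maxLen = max(maxLen, idx - seen[char] - 1)
-- 		else:
-- 			seen[char] = idx
--
-- 	return maxLen
-- ===== SOURCE B (Python) =====
-- def solution_1097_5(s: str) -> int:
--     best = -1
--     for c in set(s):
--         best = max(best, s.rfind(c) - s.find(c) - 1)
--     return best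
-- ===== Notes on version B (the rewrite author's own statement) =====
-- stated objective: simpler
-- what changed: Replaces the incremental pass maintaining a first-occurrence dict by a fold over the distinct characters of max with s.rfind(c) - s.find(c) - 1, starting at -1.
import Mathlib
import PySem

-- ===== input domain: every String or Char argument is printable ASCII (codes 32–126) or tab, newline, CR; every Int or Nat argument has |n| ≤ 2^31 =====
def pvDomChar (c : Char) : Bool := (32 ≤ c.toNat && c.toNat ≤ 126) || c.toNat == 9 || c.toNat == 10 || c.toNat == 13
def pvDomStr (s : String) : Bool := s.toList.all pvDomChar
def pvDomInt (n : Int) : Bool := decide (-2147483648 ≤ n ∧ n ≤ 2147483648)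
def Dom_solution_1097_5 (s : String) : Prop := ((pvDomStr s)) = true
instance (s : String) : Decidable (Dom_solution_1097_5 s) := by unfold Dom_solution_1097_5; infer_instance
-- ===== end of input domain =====

-- B replaces A's single incremental pass with a first-occurrence dict by a max over the
-- distinct characters of s.rfind(c) - s.find(c) - 1; objective: simpler (not faster).

-- ===== PORT A =====
-- one loop step: if char in seen: maxLen = max(maxLen, idx - seen[char] - 1) else: seen[char] = idx
def pvStepA (st : PySem.Dict Char Int × Int) (p : Int × Char) : PySem.Dict Char Int × Int :=
  if st.1.contains p.2 then (st.1, max st.2 (p.1 - st.1.getD p.2 0 - 1))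
  else (st.1.insert p.2 p.1, st.2)

-- the whole loop 'for idx, char in enumerate(s)', state (seen, maxLen) starting ({}, -1)
def pvLoopA (l : List Char) : PySem.Dict Char Int × Int :=
  (PySem.List.enumerate l 0).foldl pvStepA (PySem.Dict.empty, -1)

def solution_1097_5 (s : String) : Int :=
  (pvLoopA s.toList).2

-- ===== PORT B =====
-- gap contributed by one distinct character c: s.rfind(c) - s.find(c) - 1
def pvGapB (t : List Char) (c : Char) : Int :=
  PySem.Chars.rfind t [c] - PySem.Chars.find t [c] - 1

-- best = -1; for c in set(s): best = max(best, gap)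
def pvRunB (t : List Char) : Int :=
  (PySem.Set.ofList t).foldl (fun best c => max best (pvGapB t c)) (-1)

def solution_1097_5_alt (s : String) : Int :=
  pvRunB s.toList

-- ===== PRECONDITION & SPEC =====
def Spec_solution_1097_5 (s : String) (out : Int) : Prop := out = solution_1097_5_alt s
instance (s : String) (out : Int) : Decidable (Spec_solution_1097_5 s out) := by unfold Spec_solution_1097_5; infer_instance

-- ===== CLAIM (what is proved, stated in full; the proofs are below) =====
def Claim_equal_solution_1097_5 : Prop := ∀ (s : String), Dom_solution_1097_5 s → Spec_solution_1097_5 s (solution_1097_5 s)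

-- ===== LEMMAS AND PROOFS =====

theorem pv_enumerate_append {α : Type} (xs ys : List α) (s : Int) :
    PySem.List.enumerate (xs ++ ys) s
      = PySem.List.enumerate xs s ++ PySem.List.enumerate ys (s + xs.length) := by
  induction xs generalizing s with
  | nil => simp [PySem.List.enumerate_nil]
  | cons x t ih =>
      simp only [List.cons_append, PySem.List.enumerate_cons, ih, List.length_cons]
      push_cast
      ring_nf

theorem pv_singleton_isPrefixOf_append {d x : Char} (ys : List Char) (hne : d ≠ x) :
    [d].isPrefixOf (ys ++ [x]) = [d].isPrefixOf ys := by
  cases ys with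
  | nil => simp [List.isPrefixOf, hne]
  | cons h t => simp [List.isPrefixOf]

theorem pv_rfind_go_zero (s sub : List Char) :
    PySem.Chars.rfind.go s sub 0 = if sub.isPrefixOf s then 0 else -1 := rfl

theorem pv_rfind_go_succ (s sub : List Char) (j : Nat) :
    PySem.Chars.rfind.go s sub (j + 1)
      = if sub.isPrefixOf (s.drop (j + 1)) then ((j + 1 : Nat) : Int)
        else PySem.Chars.rfind.go s sub j := rfl

theorem pv_rfind_go_le (s sub : List Char) : ∀ j : Nat, PySem.Chars.rfind.go s sub j ≤ (j : Int) := by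
  intro j
  induction j with
  | zero => rw [pv_rfind_go_zero]; split <;> omega
  | succ j ih => rw [pv_rfind_go_succ]; split <;> [omega; exact le_trans ih (by omega)]

theorem pv_rfind_le_length (l sub : List Char) : PySem.Chars.rfind l sub ≤ (l.length : Int) := by
  simpa [PySem.Chars.rfind] using pv_rfind_go_le l sub l.length

theorem pv_rfind_append_self (l : List Char) (x : Char) :
    PySem.Chars.rfind (l ++ [x]) [x] = (l.length : Int) := by
  show PySem.Chars.rfind.go (l ++ [x]) [x] (l ++ [x]).length = _
  rw [List.length_append]
  simp only [List.length_cons, List.length_nil]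
  rw [pv_rfind_go_succ]
  have h1 : (l ++ [x]).drop (l.length + 1) = [] := by simp
  rw [h1, if_neg (by simp [List.isPrefixOf])]
  cases hn : l.length with
  | zero =>
      have hl : l = [] := List.eq_nil_of_length_eq_zero hn
      subst hl
      rw [pv_rfind_go_zero]
      simp [List.isPrefixOf]
  | succ n =>
      rw [pv_rfind_go_succ]
      have : (l ++ [x]).drop (n + 1) = [x] := by
        rw [← hn, List.drop_append_of_le_length (le_refl _), List.drop_length]; rfl
      rw [this]
      simp [List.isPrefixOf]

theorem pv_rfind_append_ne {d x : Char} (l : List Char) (hne : d ≠ x) :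
    PySem.Chars.rfind (l ++ [x]) [d] = PySem.Chars.rfind l [d] := by
  have go_eq : ∀ j : Nat, j ≤ l.length →
      PySem.Chars.rfind.go (l ++ [x]) [d] j = PySem.Chars.rfind.go l [d] j := by
    intro j
    induction j with
    | zero =>
        intro _
        rw [pv_rfind_go_zero, pv_rfind_go_zero, pv_singleton_isPrefixOf_append l hne]
    | succ j ih =>
        intro hj
        rw [pv_rfind_go_succ, pv_rfind_go_succ,
          List.drop_append_of_le_length hj,
          pv_singleton_isPrefixOf_append _ hne, ih (by omega)]
  show PySem.Chars.rfind.go (l ++ [x]) [d] (l ++ [x]).length = PySem.Chars.rfind.go l [d] l.length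
  rw [List.length_append]
  simp only [List.length_cons, List.length_nil]
  rw [pv_rfind_go_succ]
  have h1 : (l ++ [x]).drop (l.length + 1) = [] := by simp
  rw [h1, if_neg (by simp [List.isPrefixOf]), go_eq _ (le_refl _)]

theorem pv_find_go_singleton (c : Char) : ∀ (l : List Char) (k : Nat), c ∈ l →
    PySem.Chars.find.go [c] l k = ((k : Int) + l.idxOf c) := by
  intro l
  induction l with
  | nil => intro k h; cases h
  | cons h t ih =>
      intro k hm
      show (if [c].isPrefixOf (h :: t) then ((k : Nat) : Int) else PySem.Chars.find.go [c] t (k + 1)) = _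
      by_cases hc : c = h
      · subst hc; simp [List.isPrefixOf, List.idxOf_cons_self]
      · rw [if_neg (by simp [List.isPrefixOf, hc])]
        have hmt : c ∈ t := by cases hm with | head => exact absurd rfl hc | tail _ h => exact h
        rw [ih (k + 1) hmt]
        rw [List.idxOf_cons_ne _ (by exact fun h' => hc h'.symm)]
        push_cast; ring

theorem pv_find_mem {c : Char} {l : List Char} (h : c ∈ l) :
    PySem.Chars.find l [c] = (l.idxOf c : Int) := by
  simpa [PySem.Chars.find] using pv_find_go_singleton c l 0 h

theorem pv_foldl_max_le {α : Type} (xs : List α) (f : α → Int) (init b : Int)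
    (h0 : init ≤ b) (h : ∀ x ∈ xs, f x ≤ b) :
    xs.foldl (fun m x => max m (f x)) init ≤ b := by
  induction xs generalizing init with
  | nil => simpa using h0
  | cons y t ih =>
      simp only [List.foldl_cons]
      exact ih _ (max_le h0 (h y (by simp))) (fun x hx => h x (by simp [hx]))

theorem pv_foldl_max_update {α : Type} [DecidableEq α] (xs : List α) (c : α) (g g' : α → Int)
    (hc : c ∈ xs) (hg : ∀ d ∈ xs, d ≠ c → g' d = g d) (hle : g c ≤ g' c) :
    xs.foldl (fun m d => max m (g' d)) (-1)
      = max (xs.foldl (fun m d => max m (g d)) (-1)) (g' c) := by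
  have hG := PySem.List.le_foldl_max_int xs g (-1)
  have hG' := PySem.List.le_foldl_max_int xs g' (-1)
  apply le_antisymm
  · apply pv_foldl_max_le
    · exact le_trans hG.1 (le_max_left _ _)
    · intro d hd
      by_cases hdc : d = c
      · subst hdc; exact le_max_right _ _
      · rw [hg d hd hdc]; exact le_trans (hG.2 d hd) (le_max_left _ _)
  · apply max_le
    · apply pv_foldl_max_le
      · exact hG'.1
      · intro d hd
        by_cases hdc : d = c
        · subst hdc; exact le_trans hle (hG'.2 d hd)
        · rw [← hg d hd hdc]; exact hG'.2 d hd
    · exact hG'.2 c hc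

theorem pv_ofList_append (l : List Char) (c : Char) :
    PySem.Set.ofList (l ++ [c])
      = if c ∈ l then PySem.Set.ofList l else PySem.Set.ofList l ++ [c] := by
  rw [PySem.Set.ofList_eq_foldl, List.foldl_append, ← PySem.Set.ofList_eq_foldl]
  show PySem.Set.add _ c = _
  unfold PySem.Set.add
  have h : PySem.Set.contains (PySem.Set.ofList l) c = decide (c ∈ l) := by
    simp [PySem.Set.contains]
  rw [h]
  by_cases hm : c ∈ l <;> simp [hm]

-- the loop invariant: seen maps each char of the prefix to its first index,
-- and maxLen equals B's value on the prefix
theorem pv_main (l : List Char) :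
    (∀ c : Char, (pvLoopA l).1.get? c = if c ∈ l then some (l.idxOf c : Int) else none)
      ∧ (pvLoopA l).2 = pvRunB l := by
  induction l using List.reverseRecOn with
  | nil =>
      refine ⟨fun c => ?_, rfl⟩
      simp [pvLoopA, PySem.List.enumerate_nil, PySem.Dict.get?_empty]
  | append_singleton l x ih =>
      obtain ⟨ihd, ihm⟩ := ih
      have hstep : pvLoopA (l ++ [x]) = pvStepA (pvLoopA l) ((l.length : Int), x) := by
        rw [pvLoopA, pv_enumerate_append, List.foldl_append]
        simp [PySem.List.enumerate_cons, PySem.List.enumerate_nil, pvLoopA]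
      have hcont : (pvLoopA l).1.contains x = decide (x ∈ l) := by
        rw [PySem.Dict.contains_eq_isSome_get?, ihd x]
        by_cases h : x ∈ l <;> simp [h]
      by_cases hx : x ∈ l
      · -- repeated character: seen unchanged, maxLen updated
        have hgetD : (pvLoopA l).1.getD x 0 = (l.idxOf x : Int) := by
          simp [PySem.Dict.getD, ihd x, hx]
        have hstep2 : pvLoopA (l ++ [x])
            = ((pvLoopA l).1, max (pvLoopA l).2 ((l.length : Int) - (l.idxOf x : Int) - 1)) := by
          rw [hstep]; unfold pvStepA; rw [hcont]; simp [hx, hgetD]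
        constructor
        · intro c
          rw [hstep2]
          dsimp only
          rw [ihd c]
          by_cases hc : c ∈ l
          · have hcl : c ∈ l ++ [x] := by simp [hc]
            simp [hc, hcl, List.idxOf_append]
          · have hcx : c ≠ x := fun h => hc (h ▸ hx)
            have hcl : c ∉ l ++ [x] := by simp [hc, hcx]
            simp [hc, hcl]
        · rw [hstep2]
          dsimp only
          rw [ihm]
          show _ = pvRunB (l ++ [x])
          unfold pvRunB
          rw [pv_ofList_append, if_pos hx]
          rw [pv_foldl_max_update (PySem.Set.ofList l) x (pvGapB l) (pvGapB (l ++ [x]))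
            ((PySem.Set.mem_ofList l x).mpr hx)
            (fun d hd hdx => by
              have hdl : d ∈ l := (PySem.Set.mem_ofList l d).mp hd
              unfold pvGapB
              rw [pv_rfind_append_ne l hdx, pv_find_mem (by simp [hdl] : d ∈ l ++ [x]),
                pv_find_mem hdl, List.idxOf_append, if_pos hdl])
            (by
              unfold pvGapB
              rw [pv_rfind_append_self, pv_find_mem (by simp [hx] : x ∈ l ++ [x]),
                pv_find_mem hx, List.idxOf_append, if_pos hx]
              have := pv_rfind_le_length l [x]
              omega)]
          congr 1
          unfold pvGapB
          rw [pv_rfind_append_self, pv_find_mem (by simp [hx] : x ∈ l ++ [x]),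
            List.idxOf_append, if_pos hx]
      · -- new character: seen extended, maxLen unchanged
        have hstep2 : pvLoopA (l ++ [x])
            = ((pvLoopA l).1.insert x (l.length : Int), (pvLoopA l).2) := by
          rw [hstep]; unfold pvStepA; rw [hcont]; simp [hx]
        constructor
        · intro c
          rw [hstep2]
          dsimp only
          by_cases hcx : c = x
          · subst hcx
            rw [PySem.Dict.get?_insert_self]
            have hcl : c ∈ l ++ [c] := by simp
            rw [if_pos hcl, List.idxOf_append, if_neg hx]
            simp [List.idxOf_cons_self]
          · rw [PySem.Dict.get?_insert_of_ne _ _ hcx, ihd c]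
            by_cases hc : c ∈ l
            · simp [hc, List.idxOf_append, show c ∈ l ++ [x] by simp [hc]]
            · simp [hc, show c ∉ l ++ [x] by simp [hc, hcx]]
        · rw [hstep2]
          dsimp only
          rw [ihm]
          show _ = pvRunB (l ++ [x])
          unfold pvRunB
          rw [pv_ofList_append, if_neg hx, List.foldl_append]
          have hcong : (PySem.Set.ofList l).foldl
                (fun best c => max best (pvGapB (l ++ [x]) c)) (-1)
              = (PySem.Set.ofList l).foldl (fun best c => max best (pvGapB l c)) (-1) := by
            apply PySem.List.foldl_congr_mem
            intro acc d hd
            have hdl : d ∈ l := (PySem.Set.mem_ofList l d).mp hd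
            have hdx : d ≠ x := fun h => hx (h ▸ hdl)
            unfold pvGapB
            rw [pv_rfind_append_ne l hdx, pv_find_mem (by simp [hdl] : d ∈ l ++ [x]),
              pv_find_mem hdl, List.idxOf_append, if_pos hdl]
          simp only [List.foldl_cons, List.foldl_nil]
          rw [hcong]
          have hgap : pvGapB (l ++ [x]) x = -1 := by
            unfold pvGapB
            rw [pv_rfind_append_self, pv_find_mem (by simp : x ∈ l ++ [x]),
              List.idxOf_append, if_neg hx]
            simp
          rw [hgap]
          have hle := (PySem.List.le_foldl_max_int (PySem.Set.ofList l) (pvGapB l) (-1)).1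
          exact (max_eq_left hle).symm

-- ===== VERDICT (by name: the statement is the Claim_ definition above) =====
theorem solution_1097_5_spec : Claim_equal_solution_1097_5 := by
  intro s _
  show solution_1097_5 s = solution_1097_5_alt s
  exact (pv_main s.toList).2
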